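-- pv_equiv track=rewrite | github.com/grupo2elco18/illbee | PythonApp/ZigBeeReader.py | _serial
-- ===== SOURCE A (Python) =====
-- def _serial(line):
-- 	serial = line[:16]
-- 	hexC = [
-- 		'0', '1', '2', '3', '4', '5', '6', '7',
-- 		'8', '9', 'A', 'B', 'C', 'D', 'E', 'F'
-- 	]
-- 	for c in serial:
-- 		if c not in hexC:
-- 			return None
--
-- 	return serial
-- ===== SOURCE B (Python) =====
-- import re
--
-- _HEX16 = re.compile(r'[0-9A-F]*\Z')
--
-- def _serial(line):
--     serial = line[:16]
--     return serial if _HEX16.match(serial) else None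
-- ===== Notes on version B (the rewrite author's own statement) =====
-- stated objective: idiomatic
-- what changed: Replaced the explicit per-character loop with membership in a 16-element list by an anchored regular-expression match of the character class [0-9A-F]* on the 16-char prefix.
import Mathlib
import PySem

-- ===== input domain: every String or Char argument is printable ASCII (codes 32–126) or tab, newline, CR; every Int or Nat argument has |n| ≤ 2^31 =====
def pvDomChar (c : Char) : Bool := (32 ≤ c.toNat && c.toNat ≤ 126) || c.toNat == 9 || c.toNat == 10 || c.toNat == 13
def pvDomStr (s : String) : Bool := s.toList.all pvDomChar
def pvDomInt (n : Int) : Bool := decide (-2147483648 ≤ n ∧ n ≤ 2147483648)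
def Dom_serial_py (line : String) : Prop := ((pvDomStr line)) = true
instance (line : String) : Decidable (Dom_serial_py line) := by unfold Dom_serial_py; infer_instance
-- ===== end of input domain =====

-- B replaces A's explicit character loop over a 16-element hex list by an anchored
-- regex-style character-class check ([0-9A-F]* fullmatch) on the 16-char prefix (idiomatic).


-- ===== PORT A =====
def hexC : List Char :=
  ['0', '1', '2', '3', '4', '5', '6', '7',
   '8', '9', 'A', 'B', 'C', 'D', 'E', 'F']

-- the for-loop with early return over the characters of serial
def serialCheckA (serial : String) : List Char → Option String
  | [] => some serial
  | c :: rest => if c ∈ hexC then serialCheckA serial rest else none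

def serial_py (line : String) : Option String :=
  let serial := PySem.Str.slice line none (some 16)
  serialCheckA serial serial.toList

-- ===== PORT B =====
-- re.fullmatch-style anchored match of '[0-9A-F]*': exact on this class, it holds iff
-- every code point lies in one of the two ranges 0-9 (48..57) or A-F (65..70)
def hexClassB (c : Char) : Bool :=
  (48 ≤ c.toNat && c.toNat ≤ 57) || (65 ≤ c.toNat && c.toNat ≤ 70)

def serial_py_alt (line : String) : Option String :=
  let serial := PySem.Str.slice line none (some 16)
  if serial.toList.all hexClassB then some serial else none

-- ===== PRECONDITION & SPEC =====
def Spec_serial_py (line : String) (out : Option String) : Prop := out = serial_py_alt line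
instance (line : String) (out : Option String) : Decidable (Spec_serial_py line out) := by unfold Spec_serial_py; infer_instance

-- ===== CLAIM (what is proved, stated in full; the proofs are below) =====
def Claim_equal_serial_py : Prop := ∀ (line : String), Dom_serial_py line → Spec_serial_py line (serial_py line)

-- ===== LEMMAS AND PROOFS =====
theorem mem_hexC_iff (c : Char) : (c ∈ hexC) ↔ hexClassB c = true := by
  have h : ∀ d : Char, c = d ↔ c.toNat = d.toNat := by
    intro d
    constructor
    · rintro rfl; rfl
    · intro h; exact Char.ext (UInt32.toNat_inj.mp h)
  simp only [hexC, hexClassB, List.mem_cons, List.not_mem_nil, or_false, h,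
    Bool.or_eq_true, Bool.and_eq_true, decide_eq_true_eq,
    show ('0':Char).toNat = 48 from rfl, show ('1':Char).toNat = 49 from rfl,
    show ('2':Char).toNat = 50 from rfl, show ('3':Char).toNat = 51 from rfl,
    show ('4':Char).toNat = 52 from rfl, show ('5':Char).toNat = 53 from rfl,
    show ('6':Char).toNat = 54 from rfl, show ('7':Char).toNat = 55 from rfl,
    show ('8':Char).toNat = 56 from rfl, show ('9':Char).toNat = 57 from rfl,
    show ('A':Char).toNat = 65 from rfl, show ('B':Char).toNat = 66 from rfl,
    show ('C':Char).toNat = 67 from rfl, show ('D':Char).toNat = 68 from rfl,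
    show ('E':Char).toNat = 69 from rfl, show ('F':Char).toNat = 70 from rfl]
  omega

theorem serialCheckA_eq (serial : String) (l : List Char) :
    serialCheckA serial l = if l.all hexClassB then some serial else none := by
  induction l with
  | nil => rfl
  | cons c rest ih =>
    by_cases hc : c ∈ hexC
    · have := (mem_hexC_iff c).mp hc
      simp [serialCheckA, hc, ih, List.all_cons, this]
    · have : hexClassB c = false := by
        cases h : hexClassB c
        · rfl
        · exact absurd ((mem_hexC_iff c).mpr h) hc
      simp [serialCheckA, hc, List.all_cons, this]

-- ===== VERDICT (by name: the statement is the Claim_ definition above) =====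
theorem serial_py_spec : Claim_equal_serial_py := by
  intro line _
  unfold Spec_serial_py serial_py serial_py_alt
  exact serialCheckA_eq _ _
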